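-- pv_equiv track=rewrite | github.com/thegizmopro/openclaw-med-reminder-skill | setup-tasks.py | _strip_med_reminder_block
-- ===== SOURCE A (Python) =====
-- CRON_MARKER   = "# MedReminder" # crontab section marker
--
-- def _strip_med_reminder_block(lines: list) -> list:
--     """Remove the MedReminder block (from marker to blank line after it)."""
--     result = []
--     in_block = False
--     for line in lines:
--         if line.strip() == CRON_MARKER:
--             in_block = True
--             continue
--         if in_block:
--             # End of block: first non-MedReminder cron line that's non-empty
--             if line.startswith("#") or not line.strip():
--                 continue
--             else:
--                 in_block = False
--         result.append(line)
--     return result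
-- ===== SOURCE B (Python) =====
-- CRON_MARKER   = "# MedReminder" # crontab section marker
--
-- def _strip_med_reminder_block(lines: list) -> list:
--     """Remove the MedReminder block (from marker to blank line after it)."""
--     result = []
--     i = 0
--     n = len(lines)
--     while i < n:
--         line = lines[i]
--         if line.strip() == CRON_MARKER:
--             i += 1
--             while i < n and (lines[i].startswith("#") or not lines[i].strip()):
--                 i += 1
--         else:
--             result.append(line)
--             i += 1
--     return result
-- ===== Notes on version B (the rewrite author's own statement) =====
-- stated objective: alternative
-- what changed: Replaces the in_block boolean flag carried across the whole pass by an explicit index loop with an inner skip loop that consumes the marker's comment/blank block in place.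
import Mathlib
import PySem

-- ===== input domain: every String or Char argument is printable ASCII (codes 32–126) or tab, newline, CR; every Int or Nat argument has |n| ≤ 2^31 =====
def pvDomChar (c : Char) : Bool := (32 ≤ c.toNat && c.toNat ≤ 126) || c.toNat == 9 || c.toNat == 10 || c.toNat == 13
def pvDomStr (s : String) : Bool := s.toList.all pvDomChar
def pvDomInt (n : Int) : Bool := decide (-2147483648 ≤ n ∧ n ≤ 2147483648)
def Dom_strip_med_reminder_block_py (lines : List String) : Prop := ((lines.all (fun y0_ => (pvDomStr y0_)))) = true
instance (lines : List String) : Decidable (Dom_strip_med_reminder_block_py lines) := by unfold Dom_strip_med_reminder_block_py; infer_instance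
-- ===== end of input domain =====

-- B replaces A's in_block boolean flag by an explicit index loop with an inner
-- skip loop that consumes each marker's comment/blank block in place (objective: alternative).


def CRON_MARKER : String := "# MedReminder"

-- ===== PORT A =====
-- the for-loop of A, carrying the in_block flag; appends are emitted head-first
def stripALoop (lines : List String) (in_block : Bool) : List String :=
  match lines with
  | [] => []
  | line :: rest =>
    if PySem.Str.strip line = CRON_MARKER then
      stripALoop rest true
    else if in_block then
      if PySem.Str.startswith line "#" || PySem.Str.strip line = "" then
        stripALoop rest true
      else
        line :: stripALoop rest false
    else
      line :: stripALoop rest false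

def strip_med_reminder_block_py (lines : List String) : List String :=
  stripALoop lines false

-- ===== PORT B =====
-- B's inner while loop: advance past comment/blank lines
def stripBSkip (lines : List String) : List String :=
  match lines with
  | [] => []
  | line :: rest =>
    if PySem.Str.startswith line "#" || PySem.Str.strip line = "" then
      stripBSkip rest
    else
      line :: rest

theorem stripBSkip_length_le (lines : List String) : (stripBSkip lines).length ≤ lines.length := by
  induction lines with
  | nil => simp [stripBSkip]
  | cons l rest ih =>
    simp only [stripBSkip]
    split
    · exact Nat.le_trans ih (Nat.le_succ _)
    · exact Nat.le_refl _

-- B's outer while loop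
def stripBMain (lines : List String) : List String :=
  match lines with
  | [] => []
  | line :: rest =>
    if PySem.Str.strip line = CRON_MARKER then
      stripBMain (stripBSkip rest)
    else
      line :: stripBMain rest
termination_by lines.length
decreasing_by
  · exact Nat.lt_succ_of_le (stripBSkip_length_le rest)
  · exact Nat.lt_succ_self _

def strip_med_reminder_block_py_alt (lines : List String) : List String :=
  stripBMain lines

-- ===== PRECONDITION & SPEC =====
def Spec_strip_med_reminder_block_py (lines : List String) (out : List String) : Prop := out = strip_med_reminder_block_py_alt lines
instance (lines : List String) (out : List String) : Decidable (Spec_strip_med_reminder_block_py lines out) := by unfold Spec_strip_med_reminder_block_py; infer_instance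

-- ===== CLAIM (what is proved, stated in full; the proofs are below) =====
def Claim_equal_strip_med_reminder_block_py : Prop := ∀ (lines : List String), Dom_strip_med_reminder_block_py lines → Spec_strip_med_reminder_block_py lines (strip_med_reminder_block_py lines)

-- ===== LEMMAS AND PROOFS =====

-- the key invariant: flag=false matches the outer loop, flag=true matches the
-- outer loop resumed after the inner skip loop
theorem stripALoop_eq (lines : List String) :
    stripALoop lines false = stripBMain lines ∧
    stripALoop lines true = stripBMain (stripBSkip lines) := by
  induction lines with
  | nil => simp [stripALoop, stripBMain, stripBSkip]
  | cons l rest ih =>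
    obtain ⟨ihf, iht⟩ := ih
    constructor
    · simp only [stripALoop, stripBMain]
      split
      · exact iht
      · simp [ihf]
    · simp only [stripALoop, stripBSkip]
      by_cases hc : (PySem.Str.startswith l "#" || decide (PySem.Str.strip l = "")) = true
      · by_cases hm : PySem.Str.strip l = CRON_MARKER
        · rw [if_pos hm, if_pos hc]; exact iht
        · rw [if_neg hm, if_pos trivial, if_pos hc, if_pos hc]; exact iht
      · by_cases hm : PySem.Str.strip l = CRON_MARKER
        · rw [if_pos hm, if_neg hc, stripBMain.eq_def]
          show stripALoop rest true =
            if PySem.Str.strip l = CRON_MARKER then stripBMain (stripBSkip rest)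
            else l :: stripBMain rest
          rw [if_pos hm]; exact iht
        · rw [if_neg hm, if_pos trivial, if_neg hc, if_neg hc, stripBMain.eq_def]
          show l :: stripALoop rest false =
            if PySem.Str.strip l = CRON_MARKER then stripBMain (stripBSkip rest)
            else l :: stripBMain rest
          rw [if_neg hm, ihf]

-- ===== VERDICT (by name: the statement is the Claim_ definition above) =====
theorem strip_med_reminder_block_py_spec : Claim_equal_strip_med_reminder_block_py := by
  intro lines _
  unfold Spec_strip_med_reminder_block_py strip_med_reminder_block_py strip_med_reminder_block_py_alt
  exact (stripALoop_eq lines).1
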